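-- pv_equiv track=rewrite | github.com/chboishabba/SeaMeInIt | src/smii/seams/solvers_sp.py | _is_simple_cycle
-- ===== SOURCE A (Python) =====
-- from typing import Mapping, MutableMapping, Sequence
--
-- def _is_simple_cycle(edges: Sequence[tuple[int, int]]) -> bool:
--     if not edges:
--         return False
--     adjacency: MutableMapping[int, set[int]] = {}
--     for a, b in edges:
--         ai, bi = int(a), int(b)
--         adjacency.setdefault(ai, set()).add(bi)
--         adjacency.setdefault(bi, set()).add(ai)
--     if not adjacency:
--         return False
--     if any(len(neighbors) != 2 for neighbors in adjacency.values()):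
--         return False
--
--     start = next(iter(adjacency))
--     stack = [start]
--     visited: set[int] = set()
--     while stack:
--         node = stack.pop()
--         if node in visited:
--             continue
--         visited.add(node)
--         stack.extend(neighbor for neighbor in adjacency[node] if neighbor not in visited)
--     return len(visited) == len(adjacency)
-- ===== SOURCE B (Python) =====
-- from typing import Sequence
--
--
-- def _is_simple_cycle(edges: Sequence[tuple[int, int]]) -> bool:
--     if not edges:
--         return False
--     adjacency: dict[int, set[int]] = {}
--     for a, b in edges:
--         ai, bi = int(a), int(b)
--         for x, y in ((ai, bi), (bi, ai)):
--             adjacency.setdefault(x, set()).add(y)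
--     if not all(len(neighbors) == 2 for neighbors in adjacency.values()):
--         return False
--     # Round-based saturation: grow the component of the first node by adding all
--     # neighbours of the current set; len(adjacency) rounds always reach the fixpoint.
--     start = next(iter(adjacency))
--     component = {start}
--     for _ in range(len(adjacency)):
--         component |= {w for v in component for w in adjacency[v]}
--     return len(component) == len(adjacency)
-- ===== Notes on version B (the rewrite author's own statement) =====
-- stated objective: simpler
-- what changed: A's stack-based DFS with a visited set is replaced by a round-based neighbourhood saturation: starting from {start}, the component is grown len(adjacency) times by unioning in all neighbours of the current set, then compared in size with the node count.
import Mathlib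
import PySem

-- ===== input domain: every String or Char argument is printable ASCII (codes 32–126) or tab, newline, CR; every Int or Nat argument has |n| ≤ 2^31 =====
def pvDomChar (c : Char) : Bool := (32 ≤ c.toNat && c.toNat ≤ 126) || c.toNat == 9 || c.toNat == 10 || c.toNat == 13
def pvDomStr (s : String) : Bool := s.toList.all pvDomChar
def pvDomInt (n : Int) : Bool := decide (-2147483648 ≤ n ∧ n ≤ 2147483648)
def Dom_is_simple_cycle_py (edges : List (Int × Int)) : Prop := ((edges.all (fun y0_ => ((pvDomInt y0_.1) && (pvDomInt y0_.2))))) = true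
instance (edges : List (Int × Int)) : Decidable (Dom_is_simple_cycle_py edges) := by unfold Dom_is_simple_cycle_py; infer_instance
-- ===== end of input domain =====

-- B replaces A's stack-based DFS by a round-based neighbourhood saturation of the start
-- node's component (objective: simpler — no stack/visited-set bookkeeping); return values
-- are proved equal, no observable mutation is involved.

-- ===== PORT A =====
-- adjacency-building loop of A: setdefault(ai, set()).add(bi) twice per edge
def isscA_build (edges : List (Int × Int)) : PySem.Dict Int (PySem.Set Int) :=
  edges.foldl
    (fun d p =>
      (d.modify p.1 PySem.Set.empty (fun s => PySem.Set.add s p.2)).modify p.2 PySem.Set.empty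
        (fun s => PySem.Set.add s p.1))
    PySem.Dict.empty

-- A's 'while stack' DFS loop, head of the list = top of the stack; the fuel passed by
-- is_simple_cycle_py (2*size+2) always outlasts the loop (proved in isscA_dfs_spec below)
def isscA_dfs (adj : PySem.Dict Int (PySem.Set Int)) :
    Nat → List Int → PySem.Set Int → PySem.Set Int
  | 0, _, visited => visited
  | _ + 1, [], visited => visited
  | fuel + 1, node :: rest, visited =>
    if PySem.Set.contains visited node then isscA_dfs adj fuel rest visited
    else
      isscA_dfs adj fuel
        (((adj.getD node PySem.Set.empty).filter
            (fun nb => !PySem.Set.contains (PySem.Set.add visited node) nb)).reverse ++ rest)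
        (PySem.Set.add visited node)

def is_simple_cycle_py (edges : List (Int × Int)) : Bool :=
  if edges.isEmpty then false
  else if (isscA_build edges).size == 0 then false
  else if (isscA_build edges).values.any (fun neighbors => neighbors.length != 2) then false
  else
    match (isscA_build edges).keys with
    | [] => false  -- unreachable: next(iter(adjacency)) is only run on a nonempty dict
    | start :: _ =>
      (isscA_dfs (isscA_build edges) (2 * (isscA_build edges).size + 2) [start]
            PySem.Set.empty).length ==
        (isscA_build edges).size

-- ===== PORT B =====
-- B's adjacency loop: the inner 'for x, y in ((ai, bi), (bi, ai))'
def isscB_build (edges : List (Int × Int)) : PySem.Dict Int (PySem.Set Int) :=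
  edges.foldl
    (fun d p =>
      [(p.1, p.2), (p.2, p.1)].foldl
        (fun d q => d.modify q.1 PySem.Set.empty (fun s => PySem.Set.add s q.2)) d)
    PySem.Dict.empty

def is_simple_cycle_py_alt (edges : List (Int × Int)) : Bool :=
  if edges.isEmpty then false
  else if !(isscB_build edges).values.all (fun neighbors => neighbors.length == 2) then false
  else
    match (isscB_build edges).keys with
    | [] => false  -- unreachable: next(iter(adjacency)) is only run on a nonempty dict
    | start :: _ =>
      ((List.range (isscB_build edges).size).foldl
            (fun component _ =>
              PySem.Set.union component
                (component.flatMap (fun v => (isscB_build edges).getD v PySem.Set.empty)))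
            (PySem.Set.ofList [start])).length ==
        (isscB_build edges).size

-- ===== PRECONDITION & SPEC =====
def Spec_is_simple_cycle_py (edges : List (Int × Int)) (out : Bool) : Prop := out = is_simple_cycle_py_alt edges
instance (edges : List (Int × Int)) (out : Bool) : Decidable (Spec_is_simple_cycle_py edges out) := by unfold Spec_is_simple_cycle_py; infer_instance

-- ===== CLAIM (what is proved, stated in full; the proofs are below) =====
def Claim_equal_is_simple_cycle_py : Prop := ∀ (edges : List (Int × Int)), Dom_is_simple_cycle_py edges → Spec_is_simple_cycle_py edges (is_simple_cycle_py edges)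

-- ===== LEMMAS AND PROOFS =====

-- neighbour set of x (adjacency[x], empty when x is not a key)
def pvNbr (d : PySem.Dict Int (PySem.Set Int)) (x : Int) : PySem.Set Int :=
  d.getD x PySem.Set.empty

-- reachability in the adjacency graph
def pvReach (d : PySem.Dict Int (PySem.Set Int)) (s x : Int) : Prop :=
  Relation.ReflTransGen (fun a b => b ∈ pvNbr d a) s x

-- one saturation round of B
def pvGrow (d : PySem.Dict Int (PySem.Set Int)) (c : PySem.Set Int) : PySem.Set Int :=
  PySem.Set.union c (c.flatMap (fun v => d.getD v PySem.Set.empty))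

-- the two builds are the same fold
theorem isscB_build_eq (edges : List (Int × Int)) : isscB_build edges = isscA_build edges := rfl

-- combined invariant of the built adjacency: symmetry and neighbours-are-keys
def pvInv (d : PySem.Dict Int (PySem.Set Int)) : Prop :=
  ∀ x y, y ∈ pvNbr d x → x ∈ pvNbr d y ∧ x ∈ d.keys ∧ y ∈ d.keys

theorem mem_pvNbr_step (d : PySem.Dict Int (PySem.Set Int)) (p : Int × Int) (x y : Int) :
    y ∈ pvNbr ((d.modify p.1 PySem.Set.empty (fun s => PySem.Set.add s p.2)).modify p.2
        PySem.Set.empty (fun s => PySem.Set.add s p.1)) x ↔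
      y ∈ pvNbr d x ∨ (x = p.1 ∧ y = p.2) ∨ (x = p.2 ∧ y = p.1) := by
  unfold pvNbr
  rw [PySem.Dict.getD_modify]
  split_ifs with h1
  · rw [PySem.Set.mem_add, PySem.Dict.getD_modify]
    split_ifs with h2
    · rw [PySem.Set.mem_add]; subst h1; constructor
      · rintro ((h | h) | h) <;> simp_all
      · rintro (h | ⟨h, h'⟩ | ⟨h, h'⟩) <;> simp_all
    · subst h1; constructor
      · rintro (h | h) <;> simp_all
      · rintro (h | ⟨h, h'⟩ | ⟨h, h'⟩) <;> simp_all
  · rw [PySem.Dict.getD_modify]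
    split_ifs with h2
    · rw [PySem.Set.mem_add]; subst h2; constructor
      · rintro (h | h) <;> simp_all
      · rintro (h | ⟨h, h'⟩ | ⟨h, h'⟩) <;> simp_all
    · constructor
      · tauto
      · rintro (h | ⟨h, h'⟩ | ⟨h, h'⟩) <;> simp_all

theorem mem_keys_step (d : PySem.Dict Int (PySem.Set Int)) (p : Int × Int) (x : Int) :
    x ∈ ((d.modify p.1 PySem.Set.empty (fun s => PySem.Set.add s p.2)).modify p.2
        PySem.Set.empty (fun s => PySem.Set.add s p.1)).keys ↔
      x ∈ d.keys ∨ x = p.1 ∨ x = p.2 := by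
  rw [PySem.Dict.keys_modify, PySem.Dict.mem_keys_insert, PySem.Dict.keys_modify,
    PySem.Dict.mem_keys_insert]
  tauto

theorem nodup_keys_step (d : PySem.Dict Int (PySem.Set Int)) (p : Int × Int)
    (h : d.keys.Nodup) :
    ((d.modify p.1 PySem.Set.empty (fun s => PySem.Set.add s p.2)).modify p.2
        PySem.Set.empty (fun s => PySem.Set.add s p.1)).keys.Nodup := by
  rw [PySem.Dict.keys_modify]
  apply PySem.Dict.nodup_keys_insert
  rw [PySem.Dict.keys_modify]
  exact PySem.Dict.nodup_keys_insert _ _ _ h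

theorem pvInv_step (d : PySem.Dict Int (PySem.Set Int)) (p : Int × Int) (h : pvInv d) :
    pvInv ((d.modify p.1 PySem.Set.empty (fun s => PySem.Set.add s p.2)).modify p.2
        PySem.Set.empty (fun s => PySem.Set.add s p.1)) := by
  intro x y hy
  rw [mem_pvNbr_step] at hy
  rcases hy with hy | ⟨hx, hy⟩ | ⟨hx, hy⟩
  · obtain ⟨h1, h2, h3⟩ := h x y hy
    exact ⟨(mem_pvNbr_step d p y x).2 (Or.inl h1),
      (mem_keys_step d p x).2 (Or.inl h2), (mem_keys_step d p y).2 (Or.inl h3)⟩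
  · subst hx; subst hy
    exact ⟨(mem_pvNbr_step d p p.2 p.1).2 (Or.inr (Or.inr ⟨rfl, rfl⟩)),
      (mem_keys_step d p p.1).2 (Or.inr (Or.inl rfl)),
      (mem_keys_step d p p.2).2 (Or.inr (Or.inr rfl))⟩
  · subst hx; subst hy
    exact ⟨(mem_pvNbr_step d p p.1 p.2).2 (Or.inr (Or.inl ⟨rfl, rfl⟩)),
      (mem_keys_step d p p.2).2 (Or.inr (Or.inr rfl)),
      (mem_keys_step d p p.1).2 (Or.inr (Or.inl rfl))⟩

theorem pvInv_foldl (edges : List (Int × Int)) :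
    ∀ d : PySem.Dict Int (PySem.Set Int), pvInv d →
      pvInv (edges.foldl
        (fun d p =>
          (d.modify p.1 PySem.Set.empty (fun s => PySem.Set.add s p.2)).modify p.2
            PySem.Set.empty (fun s => PySem.Set.add s p.1)) d) := by
  induction edges with
  | nil => intro d h; exact h
  | cons p l ih => intro d h; exact ih _ (pvInv_step d p h)

theorem nodup_keys_foldl (edges : List (Int × Int)) :
    ∀ d : PySem.Dict Int (PySem.Set Int), d.keys.Nodup →
      (edges.foldl
        (fun d p =>
          (d.modify p.1 PySem.Set.empty (fun s => PySem.Set.add s p.2)).modify p.2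
            PySem.Set.empty (fun s => PySem.Set.add s p.1)) d).keys.Nodup := by
  induction edges with
  | nil => intro d h; exact h
  | cons p l ih => intro d h; exact ih _ (nodup_keys_step d p h)

theorem mem_keys_foldl (edges : List (Int × Int)) :
    ∀ (d : PySem.Dict Int (PySem.Set Int)) (x : Int), x ∈ d.keys →
      x ∈ (edges.foldl
        (fun d p =>
          (d.modify p.1 PySem.Set.empty (fun s => PySem.Set.add s p.2)).modify p.2
            PySem.Set.empty (fun s => PySem.Set.add s p.1)) d).keys := by
  induction edges with
  | nil => intro d x h; exact h
  | cons p l ih =>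
    intro d x h
    exact ih _ x ((mem_keys_step d p x).2 (Or.inl h))

theorem pvInv_build (edges : List (Int × Int)) : pvInv (isscA_build edges) := by
  apply pvInv_foldl
  intro x y hy
  simp [pvNbr, PySem.Dict.getD_empty, PySem.Set.empty] at hy

theorem nodup_keys_build (edges : List (Int × Int)) : (isscA_build edges).keys.Nodup := by
  apply nodup_keys_foldl
  rw [PySem.Dict.keys_empty]; exact List.nodup_nil

theorem build_keys_ne_nil (p : Int × Int) (l : List (Int × Int)) :
    (isscA_build (p :: l)).keys ≠ [] := by
  have h1 : p.1 ∈ ((PySem.Dict.empty.modify p.1 PySem.Set.empty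
      (fun s => PySem.Set.add s p.2)).modify p.2 PySem.Set.empty
      (fun s => PySem.Set.add s p.1)).keys :=
    (mem_keys_step _ p p.1).2 (Or.inr (Or.inl rfl))
  have h2 := mem_keys_foldl l _ p.1 h1
  intro hnil
  rw [show isscA_build (p :: l) = l.foldl _ _ from rfl] at hnil
  rw [hnil] at h2
  exact (List.not_mem_nil) h2

theorem size_eq_keys_length (d : PySem.Dict Int (PySem.Set Int)) :
    d.size = d.keys.length := by
  show d.items.length = (d.items.map Prod.fst).length
  rw [List.length_map]

-- degrees from the passed check
theorem deg_of_values_all (d : PySem.Dict Int (PySem.Set Int)) (hnd : d.keys.Nodup)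
    (h : ∀ v ∈ d.values, v.length = 2) :
    ∀ k ∈ d.keys, (pvNbr d k).length = 2 := by
  intro k hk
  apply h
  rw [PySem.Dict.values_eq_map_keys d hnd PySem.Set.empty]
  exact List.mem_map.2 ⟨k, hk, rfl⟩

-- contains as a decidable membership
theorem contains_eq_decide (s : PySem.Set Int) (k : Int) :
    PySem.Set.contains s k = decide (k ∈ s) := by
  by_cases h : k ∈ s
  · simp [h]
  · simp only [h, decide_false]
    by_contra hc
    exact h ((PySem.Set.contains_iff s k).1
      (by revert hc; cases PySem.Set.contains s k <;> simp))

-- popping an unvisited key strictly shrinks the unvisited-keys count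
theorem filter_visited_decr (keys : List Int) (visited : PySem.Set Int) (node : Int)
    (hk : node ∈ keys) (hv : node ∉ visited) :
    (keys.filter (fun k => !PySem.Set.contains (PySem.Set.add visited node) k)).length + 1 ≤
      (keys.filter (fun k => !PySem.Set.contains visited k)).length := by
  have hpq : ∀ x, (!PySem.Set.contains (PySem.Set.add visited node) x) = true →
      (!PySem.Set.contains visited x) = true := by
    intro x hx
    rw [contains_eq_decide] at hx ⊢
    simp only [Bool.not_eq_true', decide_eq_false_iff_not] at hx ⊢
    intro hmem
    exact hx ((PySem.Set.mem_add visited node x).2 (Or.inl hmem))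
  induction keys with
  | nil => exact absurd hk List.not_mem_nil
  | cons a l ih =>
    by_cases hna : a = node
    · subst hna
      have c1 : (!PySem.Set.contains (PySem.Set.add visited a) a) = false := by
        rw [contains_eq_decide]
        simp [(PySem.Set.mem_add visited a a).2 (Or.inr rfl)]
      have c2 : (!PySem.Set.contains visited a) = true := by
        rw [contains_eq_decide]; simp [hv]
      rw [List.filter_cons, List.filter_cons, c1, c2]
      simp only [Bool.false_eq_true, if_false, if_pos, List.length_cons]
      have hmono : (l.filter (fun k => !PySem.Set.contains (PySem.Set.add visited a) k)).length ≤
          (l.filter (fun k => !PySem.Set.contains visited k)).length := by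
        rw [← List.countP_eq_length_filter, ← List.countP_eq_length_filter]
        exact List.countP_mono_left (fun x _ hx => hpq x hx)
      omega
    · have ha : node ∈ l := by
        rcases List.mem_cons.1 hk with h | h
        · exact absurd h.symm hna
        · exact h
      have ihl := ih ha
      rw [List.filter_cons, List.filter_cons]
      cases hc1 : (!PySem.Set.contains (PySem.Set.add visited node) a) with
      | false =>
        cases hc2 : (!PySem.Set.contains visited a) with
        | false => simpa using ihl
        | true => simp only [Bool.false_eq_true, if_false, if_pos, List.length_cons]; omega
      | true =>
        have hc2 := hpq a hc1
        simp only [hc2, if_pos, List.length_cons]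
        omega

-- the DFS loop: with the invariants below and enough fuel it returns a Nodup list that
-- contains the start, consists of reachable nodes, and is closed under adjacency
theorem isscA_dfs_spec (d : PySem.Dict Int (PySem.Set Int)) (start : Int)
    (hkeys : ∀ x y, y ∈ pvNbr d x → y ∈ d.keys)
    (hdeg : ∀ k ∈ d.keys, (pvNbr d k).length = 2) :
    ∀ (fuel : Nat) (stack : List Int) (visited : PySem.Set Int),
      (∀ x ∈ stack, pvReach d start x) →
      (∀ x ∈ visited, pvReach d start x) →
      (∀ v ∈ visited, ∀ w ∈ pvNbr d v, w ∈ visited ∨ w ∈ stack) →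
      (start ∈ visited ∨ start ∈ stack) →
      (∀ x ∈ stack, x ∈ d.keys) →
      visited.Nodup →
      2 * (d.keys.filter (fun k => !PySem.Set.contains visited k)).length + stack.length ≤ fuel →
      (isscA_dfs d fuel stack visited).Nodup ∧ start ∈ isscA_dfs d fuel stack visited ∧
        (∀ x ∈ isscA_dfs d fuel stack visited, pvReach d start x) ∧
        (∀ v ∈ isscA_dfs d fuel stack visited, ∀ w ∈ pvNbr d v,
          w ∈ isscA_dfs d fuel stack visited) := by
  intro fuel
  induction fuel with
  | zero =>
    intro stack visited h1 h2 h3 h4 h5 h6 h7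
    have hstack : stack = [] := by
      have : stack.length = 0 := by omega
      exact List.length_eq_zero_iff.1 this
    subst hstack
    refine ⟨h6, ?_, h2, ?_⟩
    · rcases h4 with h | h
      · exact h
      · exact absurd h (List.not_mem_nil)
    · intro v hv w hw
      rcases h3 v hv w hw with h | h
      · exact h
      · exact absurd h (List.not_mem_nil)
  | succ n ih =>
    intro stack visited h1 h2 h3 h4 h5 h6 h7
    match stack with
    | [] =>
      refine ⟨h6, ?_, h2, ?_⟩
      · rcases h4 with h | h
        · exact h
        · exact absurd h (List.not_mem_nil)
      · intro v hv w hw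
        rcases h3 v hv w hw with h | h
        · exact h
        · exact absurd h (List.not_mem_nil)
    | node :: rest =>
      by_cases hvis : node ∈ visited
      · have hcond : PySem.Set.contains visited node = true :=
          (PySem.Set.contains_iff visited node).2 hvis
        simp only [isscA_dfs]
        rw [if_pos hcond]
        apply ih rest visited
        · intro x hx; exact h1 x (List.mem_cons_of_mem _ hx)
        · exact h2
        · intro v hv w hw
          rcases h3 v hv w hw with h | h
          · exact Or.inl h
          · rcases List.mem_cons.1 h with rfl | h
            · exact Or.inl hvis
            · exact Or.inr h
        · rcases h4 with h | h
          · exact Or.inl h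
          · rcases List.mem_cons.1 h with rfl | h
            · exact Or.inl hvis
            · exact Or.inr h
        · intro x hx; exact h5 x (List.mem_cons_of_mem _ hx)
        · exact h6
        · simp only [List.length_cons] at h7; omega
      · have hcond : PySem.Set.contains visited node = false := by
          rw [contains_eq_decide]; simp [hvis]
        simp only [isscA_dfs]
        rw [if_neg (by simpa using hvis)]
        have hnodekey : node ∈ d.keys := h5 node (List.mem_cons_self ..)
        have hreach : pvReach d start node := h1 node (List.mem_cons_self ..)
        have hmemadd : ∀ x, x ∈ PySem.Set.add visited node ↔ x ∈ visited ∨ x = node :=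
          fun x => PySem.Set.mem_add visited node x
        apply ih
        · intro x hx
          rcases List.mem_append.1 hx with hx | hx
          · rw [List.mem_reverse, List.mem_filter] at hx
            exact hreach.tail hx.1
          · exact h1 x (List.mem_cons_of_mem _ hx)
        · intro x hx
          rcases (hmemadd x).1 hx with hx | rfl
          · exact h2 x hx
          · exact hreach
        · intro v hv w hw
          rcases (hmemadd v).1 hv with hv' | hveq
          · rcases h3 v hv' w hw with h | h
            · exact Or.inl ((hmemadd w).2 (Or.inl h))
            · rcases List.mem_cons.1 h with h' | h'
              · exact Or.inl ((hmemadd w).2 (Or.inr h'))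
              · exact Or.inr (List.mem_append.2 (Or.inr h'))
          · have hw2 : w ∈ pvNbr d node := hveq ▸ hw
            by_cases hw' : w ∈ PySem.Set.add visited node
            · exact Or.inl hw'
            · refine Or.inr (List.mem_append.2 (Or.inl ?_))
              rw [List.mem_reverse, List.mem_filter]
              refine ⟨hw2, ?_⟩
              rw [contains_eq_decide]
              simpa using hw'
        · rcases h4 with h | h
          · exact Or.inl ((hmemadd start).2 (Or.inl h))
          · rcases List.mem_cons.1 h with rfl | h
            · exact Or.inl ((hmemadd start).2 (Or.inr rfl))
            · exact Or.inr (List.mem_append.2 (Or.inr h))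
        · intro x hx
          rcases List.mem_append.1 hx with hx | hx
          · rw [List.mem_reverse, List.mem_filter] at hx
            exact hkeys node x hx.1
          · exact h5 x (List.mem_cons_of_mem _ hx)
        · rw [PySem.Set.add_of_not_mem hvis]
          exact List.Nodup.append h6 (List.nodup_singleton _)
            (fun a ha hb => hvis (by rwa [List.mem_singleton.1 hb] at ha))
        · have hpush : ((pvNbr d node).filter
              (fun nb => !PySem.Set.contains (PySem.Set.add visited node) nb)).length ≤ 2 := by
            calc ((pvNbr d node).filter _).length ≤ (pvNbr d node).length :=
                  List.length_filter_le _ _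
              _ = 2 := hdeg node hnodekey
          have hdecr := filter_visited_decr d.keys visited node hnodekey hvis
          simp only [List.length_append, List.length_reverse, List.length_cons] at h7 ⊢
          have : ((pvNbr d node).filter
              (fun nb => !PySem.Set.contains (PySem.Set.add visited node) nb)).length =
              (((d.getD node PySem.Set.empty)).filter
              (fun nb => !PySem.Set.contains (PySem.Set.add visited node) nb)).length := rfl
          omega

-- one saturation round: membership characterisation, monotonicity, stabilisation
theorem mem_pvGrow (d : PySem.Dict Int (PySem.Set Int)) (c : PySem.Set Int) (x : Int) :
    x ∈ pvGrow d c ↔ x ∈ c ∨ ∃ v ∈ c, x ∈ pvNbr d v := by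
  unfold pvGrow
  rw [PySem.Set.mem_union]
  simp [List.mem_flatMap, pvNbr]

theorem pvGrow_eq_of_closed (d : PySem.Dict Int (PySem.Set Int)) (c : PySem.Set Int)
    (h : ∀ x ∈ pvGrow d c, x ∈ c) : pvGrow d c = c := by
  have : pvGrow d c = PySem.Set.update c (c.flatMap (fun v => d.getD v PySem.Set.empty)) := rfl
  rw [this, PySem.Set.update_eq_append_filter]
  have hnil : (PySem.Set.ofList (c.flatMap (fun v => d.getD v PySem.Set.empty))).filter
      (fun y => !c.contains y) = [] := by
    rw [List.filter_eq_nil_iff]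
    intro y hy
    have hy' : y ∈ c.flatMap (fun v => d.getD v PySem.Set.empty) :=
      (PySem.Set.mem_ofList _ _).1 hy
    have hyg : y ∈ pvGrow d c := (PySem.Set.mem_union _ _ _).2 (Or.inr hy')
    simp
    exact h y hyg
  rw [hnil, List.append_nil]

theorem pvGrow_length_of_not_closed (d : PySem.Dict Int (PySem.Set Int)) (c : PySem.Set Int)
    (h : ¬ ∀ x ∈ pvGrow d c, x ∈ c) : c.length + 1 ≤ (pvGrow d c).length := by
  push_neg at h
  obtain ⟨x, hx, hxc⟩ := h
  have : pvGrow d c = c ++ (PySem.Set.ofList (c.flatMap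
      (fun v => d.getD v PySem.Set.empty))).filter (fun y => !c.contains y) := by
    show PySem.Set.update c _ = _
    rw [PySem.Set.update_eq_append_filter]
  rw [this] at hx ⊢
  rw [List.length_append]
  rcases List.mem_append.1 hx with h | h
  · exact absurd h hxc
  · have : ((PySem.Set.ofList (c.flatMap (fun v => d.getD v PySem.Set.empty))).filter
        (fun y => !c.contains y)).length ≠ 0 := by
      intro h0
      rw [List.length_eq_zero_iff] at h0
      rw [h0] at h
      exact (List.not_mem_nil) h
    omega

theorem mem_pvGrow_of_mem (d : PySem.Dict Int (PySem.Set Int)) (c : PySem.Set Int) (x : Int)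
    (h : x ∈ c) : x ∈ pvGrow d c := (PySem.Set.mem_union _ _ _).2 (Or.inl h)

theorem nodup_pvGrow (d : PySem.Dict Int (PySem.Set Int)) (c : PySem.Set Int)
    (h : c.Nodup) : (pvGrow d c).Nodup := PySem.Set.nodup_union _ _ h

-- the range-fold of B is iteration of pvGrow
theorem foldl_range_grow (d : PySem.Dict Int (PySem.Set Int)) (init : PySem.Set Int) :
    ∀ n : Nat, (List.range n).foldl
        (fun component _ =>
          PySem.Set.union component
            (component.flatMap (fun v => d.getD v PySem.Set.empty))) init =
      (pvGrow d)^[n] init := by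
  intro n
  induction n with
  | zero => rfl
  | succ m ih =>
    rw [List.range_succ, List.foldl_append, ih, Function.iterate_succ_apply']
    rfl

-- iterated saturation facts, by induction on the round count
theorem pvIter_facts (d : PySem.Dict Int (PySem.Set Int)) (start : Int)
    (hkeys : ∀ x y, y ∈ pvNbr d x → y ∈ d.keys) (hstart : start ∈ d.keys) :
    ∀ k : Nat, ((pvGrow d)^[k] [start]).Nodup ∧ start ∈ (pvGrow d)^[k] [start] ∧
      (∀ x ∈ (pvGrow d)^[k] [start], pvReach d start x ∧ x ∈ d.keys) := by
  intro k
  induction k with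
  | zero =>
    simp only [Function.iterate_zero_apply]
    refine ⟨List.nodup_singleton _, List.mem_singleton_self _, ?_⟩
    intro x hx
    rw [List.mem_singleton] at hx
    subst hx
    exact ⟨Relation.ReflTransGen.refl, hstart⟩
  | succ m ih =>
    obtain ⟨ihn, ihs, ihm⟩ := ih
    rw [Function.iterate_succ_apply']
    refine ⟨nodup_pvGrow d _ ihn, mem_pvGrow_of_mem d _ _ ihs, ?_⟩
    intro x hx
    rcases (mem_pvGrow d _ x).1 hx with hx | ⟨v, hv, hxv⟩
    · exact ihm x hx
    · exact ⟨(ihm v hv).1.tail hxv, hkeys v x hxv⟩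

theorem pvIter_closed_or_big (d : PySem.Dict Int (PySem.Set Int)) (start : Int) :
    ∀ k : Nat, (∀ x ∈ pvGrow d ((pvGrow d)^[k] [start]), x ∈ (pvGrow d)^[k] [start]) ∨
      k + 1 ≤ ((pvGrow d)^[k] [start]).length := by
  intro k
  induction k with
  | zero => exact Or.inr (by simp)
  | succ m ih =>
    rcases ih with hcl | hlen
    · left
      rw [Function.iterate_succ_apply', pvGrow_eq_of_closed d _ hcl]
      exact hcl
    · by_cases hcl : ∀ x ∈ pvGrow d ((pvGrow d)^[m+1] [start]), x ∈ (pvGrow d)^[m+1] [start]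
      · exact Or.inl hcl
      · right
        rw [Function.iterate_succ_apply']
        have := pvGrow_length_of_not_closed d ((pvGrow d)^[m] [start]) ?_
        · omega
        · intro hcl2
          apply hcl
          rw [Function.iterate_succ_apply', pvGrow_eq_of_closed d _ hcl2]
          exact hcl2

-- a Nodup list of keys-members is no longer than the key list
theorem length_le_keys (c : List Int) (keys : List Int) (hnd : c.Nodup)
    (hsub : ∀ x ∈ c, x ∈ keys) : c.length ≤ keys.length := by
  calc c.length = c.toFinset.card := (List.toFinset_card_of_nodup hnd).symm
    _ ≤ keys.toFinset.card := by
        apply Finset.card_le_card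
        intro x hx
        rw [List.mem_toFinset] at hx ⊢
        exact hsub x hx
    _ ≤ keys.length := List.toFinset_card_le _

-- the saturated set after size-many rounds is exactly the reachable set
theorem pvIter_char (d : PySem.Dict Int (PySem.Set Int)) (start : Int)
    (hkeys : ∀ x y, y ∈ pvNbr d x → y ∈ d.keys) (hstart : start ∈ d.keys) :
    ((pvGrow d)^[d.keys.length] [start]).Nodup ∧
      (∀ x, x ∈ (pvGrow d)^[d.keys.length] [start] ↔ pvReach d start x) := by
  set n := d.keys.length with hn
  obtain ⟨hnd, hs, hmem⟩ := pvIter_facts d start hkeys hstart n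
  have hclosed : ∀ x ∈ pvGrow d ((pvGrow d)^[n] [start]), x ∈ (pvGrow d)^[n] [start] := by
    rcases pvIter_closed_or_big d start n with h | h
    · exact h
    · have := length_le_keys ((pvGrow d)^[n] [start]) d.keys hnd (fun x hx => (hmem x hx).2)
      omega
  refine ⟨hnd, ?_⟩
  intro x
  constructor
  · intro hx; exact (hmem x hx).1
  · intro hx
    induction hx with
    | refl => exact hs
    | tail hab hbc ih =>
      apply hclosed
      rw [mem_pvGrow]
      exact Or.inr ⟨_, ih, hbc⟩

-- any (!= 2) is the negation of all (== 2)
theorem any_bne_eq_not_all (l : List (PySem.Set Int)) :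
    l.any (fun neighbors => neighbors.length != 2) =
      !l.all (fun neighbors => neighbors.length == 2) := by
  induction l with
  | nil => rfl
  | cons a l ih =>
    simp only [List.any_cons, List.all_cons, Bool.not_and, bne] at ih ⊢
    rw [ih]

-- ===== VERDICT (by name: the statement is the Claim_ definition above) =====
theorem is_simple_cycle_py_spec : Claim_equal_is_simple_cycle_py := by
  intro edges _
  unfold Spec_is_simple_cycle_py
  match edges with
  | [] => rfl
  | p :: l =>
    unfold is_simple_cycle_py is_simple_cycle_py_alt
    rw [isscB_build_eq]
    set d := isscA_build (p :: l) with hd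
    have hne : d.keys ≠ [] := build_keys_ne_nil p l
    have hnd : d.keys.Nodup := nodup_keys_build (p :: l)
    have hinv : pvInv d := pvInv_build (p :: l)
    have hsize : d.size = d.keys.length := size_eq_keys_length d
    have hsz : (d.size == 0) = false := by
      have : d.keys.length ≠ 0 := fun h => hne (List.length_eq_zero_iff.1 h)
      simp [hsize, this]
    rw [show ((p :: l : List (Int × Int)).isEmpty) = false from rfl]
    simp only [Bool.false_eq_true, if_false, hsz]
    rw [any_bne_eq_not_all]
    by_cases hall : d.values.all (fun neighbors => neighbors.length == 2) = true
    · rw [hall]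
      simp only [Bool.not_true, Bool.false_eq_true, if_false]
      have hdeg : ∀ k ∈ d.keys, (pvNbr d k).length = 2 := by
        apply deg_of_values_all d hnd
        intro v hv
        have := List.all_eq_true.1 hall v hv
        exact Nat.eq_of_beq_eq_true (by simpa using this)
      have hkeys : ∀ x y, y ∈ pvNbr d x → y ∈ d.keys := fun x y h => (hinv x y h).2.2
      match hk : d.keys with
      | [] => exact absurd hk hne
      | start :: ks =>
        have hstart : start ∈ d.keys := by rw [hk]; exact List.mem_cons_self ..
        -- A side
        have hAspec := isscA_dfs_spec d start hkeys hdeg (2 * d.size + 2) [start]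
          PySem.Set.empty
          (by intro x hx; rw [List.mem_singleton] at hx; subst hx
              exact Relation.ReflTransGen.refl)
          (by intro x hx; exact absurd hx (List.not_mem_nil))
          (by intro v hv; exact absurd hv (List.not_mem_nil))
          (Or.inr (List.mem_singleton_self _))
          (by intro x hx; rw [List.mem_singleton] at hx; subst hx; exact hstart)
          List.nodup_nil
          (by
            have hfilter : d.keys.filter (fun k => !PySem.Set.contains PySem.Set.empty k) =
                d.keys := by
              apply List.filter_eq_self.2
              intro a _
              rfl
            rw [hfilter, hsize]
            simp)
        obtain ⟨hAnd, hAs, hAr, hAc⟩ := hAspec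
        -- membership characterisation of A's visited set
        have hAchar : ∀ x, x ∈ isscA_dfs d (2 * d.size + 2) [start] PySem.Set.empty ↔
            pvReach d start x := by
          intro x
          constructor
          · exact hAr x
          · intro hx
            induction hx with
            | refl => exact hAs
            | tail hab hbc ih => exact hAc _ ih _ hbc
        -- B side
        show ((isscA_dfs d (2 * d.size + 2) [start] PySem.Set.empty).length == d.size) =
          (((List.range d.size).foldl
              (fun component _ =>
                PySem.Set.union component
                  (component.flatMap (fun v => d.getD v PySem.Set.empty)))
              (PySem.Set.ofList [start])).length == d.size)
        rw [foldl_range_grow d (PySem.Set.ofList [start]) d.size]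
        have hofl : (PySem.Set.ofList [start] : PySem.Set Int) = [start] := rfl
        rw [hofl]
        obtain ⟨hBnd, hBchar⟩ := pvIter_char d start hkeys hstart
        have hBnd' : ((pvGrow d)^[d.size] [start]).Nodup := by rw [hsize]; exact hBnd
        have hBchar' : ∀ x, x ∈ (pvGrow d)^[d.size] [start] ↔ pvReach d start x := by
          rw [hsize]; exact hBchar
        -- equal lengths
        have hperm : (isscA_dfs d (2 * d.size + 2) [start] PySem.Set.empty).Perm
            ((pvGrow d)^[d.size] [start]) := by
          rw [List.perm_ext_iff_of_nodup hAnd hBnd']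
          intro a
          rw [hAchar a, hBchar' a]
        rw [hperm.length_eq]
    · simp only [Bool.not_eq_true] at hall
      rw [hall]
      simp
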